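-- pv_equiv track=rewrite | github.com/Pixel-20/Plagiarism_Detector_Web_GUI | plagiarism_detector/detector.py | extract_cpp_patterns
-- ===== SOURCE A (Python) =====
-- def extract_cpp_patterns(tokens):
--     """Extract C++ specific patterns from tokens."""
--     patterns = {
--         'memory_management': [],
--         'template_usage': [],
--         'stl_usage': [],
--         'pointer_usage': []
--     }
--
--     # Look for memory management patterns
--     for i, (kind, text, _) in enumerate(tokens):
--         if text in ['new', 'delete', 'malloc', 'free', 'alloc']:
--             patterns['memory_management'].append((i, text))
--         elif text in ['template', 'typename', 'class'] and kind == 'KEYWORD':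
--             patterns['template_usage'].append((i, text))
--         elif text in ['vector', 'map', 'set', 'list', 'queue', 'stack', 'array', 'deque']:
--             patterns['stl_usage'].append((i, text))
--         elif text in ['*', '&', '->', 'nullptr', 'NULL']:
--             patterns['pointer_usage'].append((i, text))
--
--     return patterns
-- ===== SOURCE B (Python) =====
-- def extract_cpp_patterns(tokens):
--     """Extract C++ specific patterns from tokens (four independent passes)."""
--     MEM = {'new', 'delete', 'malloc', 'free', 'alloc'}
--     TEMPL = {'template', 'typename', 'class'}
--     STL = {'vector', 'map', 'set', 'list', 'queue', 'stack', 'array', 'deque'}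
--     PTR = {'*', '&', '->', 'nullptr', 'NULL'}
--     return {
--         'memory_management': [(i, text) for i, (kind, text, _) in enumerate(tokens) if text in MEM],
--         'template_usage': [(i, text) for i, (kind, text, _) in enumerate(tokens) if text in TEMPL and kind == 'KEYWORD'],
--         'stl_usage': [(i, text) for i, (kind, text, _) in enumerate(tokens) if text in STL],
--         'pointer_usage': [(i, text) for i, (kind, text, _) in enumerate(tokens) if text in PTR],
--     }
-- ===== Notes on version B (the rewrite author's own statement) =====
-- stated objective: idiomatic
-- what changed: Replaces the single stateful if/elif loop appending into a mutable dict with four independent list comprehensions (one pass per category, each a set-membership filter over enumerate(tokens)); equivalence holds because the category word sets are pairwise disjoint.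
import Mathlib
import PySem

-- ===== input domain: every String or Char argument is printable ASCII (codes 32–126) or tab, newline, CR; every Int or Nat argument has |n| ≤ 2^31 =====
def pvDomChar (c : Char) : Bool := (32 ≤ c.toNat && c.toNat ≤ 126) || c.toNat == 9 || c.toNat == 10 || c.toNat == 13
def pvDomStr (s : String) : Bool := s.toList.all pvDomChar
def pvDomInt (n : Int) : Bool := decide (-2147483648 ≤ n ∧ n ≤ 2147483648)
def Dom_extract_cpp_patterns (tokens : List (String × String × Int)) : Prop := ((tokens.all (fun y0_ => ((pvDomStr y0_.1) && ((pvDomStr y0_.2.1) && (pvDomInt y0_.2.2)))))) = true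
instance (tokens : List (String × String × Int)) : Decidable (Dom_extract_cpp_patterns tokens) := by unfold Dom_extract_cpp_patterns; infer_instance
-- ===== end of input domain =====

-- B replaces A's single stateful if/elif loop with four independent one-pass
-- comprehension filters (one per category); objective: idiomatic. Equivalence
-- rests on the category word sets being pairwise disjoint.


-- ===== PORT A =====
-- one step of A's loop: the if/elif chain, appending to the matching bucket
def pvStepA (acc : List (Int × String) × List (Int × String) × List (Int × String) × List (Int × String))
    (x : Int × (String × String × Int)) :
    List (Int × String) × List (Int × String) × List (Int × String) × List (Int × String) :=
  match x, acc with
  | (i, (kind, text, _)), (mm, tu, su, pu) =>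
    if text ∈ ["new", "delete", "malloc", "free", "alloc"] then
      (mm ++ [(i, text)], tu, su, pu)
    else if text ∈ ["template", "typename", "class"] ∧ kind = "KEYWORD" then
      (mm, tu ++ [(i, text)], su, pu)
    else if text ∈ ["vector", "map", "set", "list", "queue", "stack", "array", "deque"] then
      (mm, tu, su ++ [(i, text)], pu)
    else if text ∈ ["*", "&", "->", "nullptr", "NULL"] then
      (mm, tu, su, pu ++ [(i, text)])
    else
      (mm, tu, su, pu)

def extract_cpp_patterns (tokens : List (String × String × Int)) : List (String × List (Int × String)) :=
  match (PySem.List.enumerate tokens).foldl pvStepA ([], [], [], []) with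
  | (mm, tu, su, pu) =>
    [("memory_management", mm), ("template_usage", tu), ("stl_usage", su), ("pointer_usage", pu)]

-- ===== PORT B =====
-- each comprehension '[(i, text) for i,(kind,text,_) in enumerate(tokens) if cond]' is a filterMap
def pvCompMM (tokens : List (String × String × Int)) : List (Int × String) :=
  (PySem.List.enumerate tokens).filterMap (fun x =>
    if x.2.2.1 ∈ ["new", "delete", "malloc", "free", "alloc"] then some (x.1, x.2.2.1) else none)

def pvCompTU (tokens : List (String × String × Int)) : List (Int × String) :=
  (PySem.List.enumerate tokens).filterMap (fun x =>
    if x.2.2.1 ∈ ["template", "typename", "class"] ∧ x.2.1 = "KEYWORD" then some (x.1, x.2.2.1) else none)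

def pvCompSU (tokens : List (String × String × Int)) : List (Int × String) :=
  (PySem.List.enumerate tokens).filterMap (fun x =>
    if x.2.2.1 ∈ ["vector", "map", "set", "list", "queue", "stack", "array", "deque"] then some (x.1, x.2.2.1) else none)

def pvCompPU (tokens : List (String × String × Int)) : List (Int × String) :=
  (PySem.List.enumerate tokens).filterMap (fun x =>
    if x.2.2.1 ∈ ["*", "&", "->", "nullptr", "NULL"] then some (x.1, x.2.2.1) else none)

def extract_cpp_patterns_alt (tokens : List (String × String × Int)) : List (String × List (Int × String)) :=
  [("memory_management", pvCompMM tokens), ("template_usage", pvCompTU tokens),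
   ("stl_usage", pvCompSU tokens), ("pointer_usage", pvCompPU tokens)]

-- ===== PRECONDITION & SPEC =====
def Spec_extract_cpp_patterns (tokens : List (String × String × Int)) (out : List (String × List (Int × String))) : Prop := out = extract_cpp_patterns_alt tokens
instance (tokens : List (String × String × Int)) (out : List (String × List (Int × String))) : Decidable (Spec_extract_cpp_patterns tokens out) := by unfold Spec_extract_cpp_patterns; infer_instance

-- ===== CLAIM (what is proved, stated in full; the proofs are below) =====
def Claim_equal_extract_cpp_patterns : Prop := ∀ (tokens : List (String × String × Int)), Dom_extract_cpp_patterns tokens → Spec_extract_cpp_patterns tokens (extract_cpp_patterns tokens)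

-- ===== LEMMAS AND PROOFS =====

-- the category word sets are pairwise disjoint
theorem pv_tu_not_mm (t : String) (h : t ∈ ["template", "typename", "class"]) :
    t ∉ ["new", "delete", "malloc", "free", "alloc"] := by
  simp only [List.mem_cons, List.not_mem_nil, or_false] at h ⊢
  rcases h with h | h | h <;> subst h <;> decide

theorem pv_su_not_mm (t : String) (h : t ∈ ["vector", "map", "set", "list", "queue", "stack", "array", "deque"]) :
    t ∉ ["new", "delete", "malloc", "free", "alloc"] := by
  simp only [List.mem_cons, List.not_mem_nil, or_false] at h ⊢
  rcases h with h | h | h | h | h | h | h | h <;> subst h <;> decide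

theorem pv_su_not_tu (t : String) (h : t ∈ ["vector", "map", "set", "list", "queue", "stack", "array", "deque"]) :
    t ∉ ["template", "typename", "class"] := by
  simp only [List.mem_cons, List.not_mem_nil, or_false] at h ⊢
  rcases h with h | h | h | h | h | h | h | h <;> subst h <;> decide

theorem pv_pu_not_mm (t : String) (h : t ∈ ["*", "&", "->", "nullptr", "NULL"]) :
    t ∉ ["new", "delete", "malloc", "free", "alloc"] := by
  simp only [List.mem_cons, List.not_mem_nil, or_false] at h ⊢
  rcases h with h | h | h | h | h <;> subst h <;> decide

theorem pv_pu_not_tu (t : String) (h : t ∈ ["*", "&", "->", "nullptr", "NULL"]) :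
    t ∉ ["template", "typename", "class"] := by
  simp only [List.mem_cons, List.not_mem_nil, or_false] at h ⊢
  rcases h with h | h | h | h | h <;> subst h <;> decide

theorem pv_pu_not_su (t : String) (h : t ∈ ["*", "&", "->", "nullptr", "NULL"]) :
    t ∉ ["vector", "map", "set", "list", "queue", "stack", "array", "deque"] := by
  simp only [List.mem_cons, List.not_mem_nil, or_false] at h ⊢
  rcases h with h | h | h | h | h <;> subst h <;> decide

-- loop invariant: A's fold appends, to each accumulator, the filter with A's CHAINED (elif) condition
theorem pv_foldl_spec (l : List (Int × (String × String × Int)))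
    (mm tu su pu : List (Int × String)) :
    l.foldl pvStepA (mm, tu, su, pu) =
      (mm ++ l.filterMap (fun x => if x.2.2.1 ∈ ["new", "delete", "malloc", "free", "alloc"] then some (x.1, x.2.2.1) else none),
       tu ++ l.filterMap (fun x => if x.2.2.1 ∉ ["new", "delete", "malloc", "free", "alloc"] ∧ (x.2.2.1 ∈ ["template", "typename", "class"] ∧ x.2.1 = "KEYWORD") then some (x.1, x.2.2.1) else none),
       su ++ l.filterMap (fun x => if x.2.2.1 ∉ ["new", "delete", "malloc", "free", "alloc"] ∧ ¬(x.2.2.1 ∈ ["template", "typename", "class"] ∧ x.2.1 = "KEYWORD") ∧ x.2.2.1 ∈ ["vector", "map", "set", "list", "queue", "stack", "array", "deque"] then some (x.1, x.2.2.1) else none),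
       pu ++ l.filterMap (fun x => if x.2.2.1 ∉ ["new", "delete", "malloc", "free", "alloc"] ∧ ¬(x.2.2.1 ∈ ["template", "typename", "class"] ∧ x.2.1 = "KEYWORD") ∧ x.2.2.1 ∉ ["vector", "map", "set", "list", "queue", "stack", "array", "deque"] ∧ x.2.2.1 ∈ ["*", "&", "->", "nullptr", "NULL"] then some (x.1, x.2.2.1) else none)) := by
  induction l generalizing mm tu su pu with
  | nil => simp
  | cons x xs ih =>
    obtain ⟨i, kind, text, j⟩ := x
    simp only [List.foldl_cons, List.filterMap_cons, pvStepA]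
    by_cases h1 : text ∈ ["new", "delete", "malloc", "free", "alloc"]
    · rw [if_pos h1, ih]; simp [h1]
    · rw [if_neg h1]
      by_cases h2 : text ∈ ["template", "typename", "class"] ∧ kind = "KEYWORD"
      · rw [if_pos h2, ih]; simp [h1, h2]
      · rw [if_neg h2]
        by_cases h3 : text ∈ ["vector", "map", "set", "list", "queue", "stack", "array", "deque"]
        · rw [if_pos h3, ih]
          have h2' : ¬(text ∈ ["template", "typename", "class"] ∧ kind = "KEYWORD") := h2
          simp only [List.mem_cons, List.not_mem_nil, or_false] at h1 h2' h3 ⊢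
          simp [h1, h2', h3]
        · rw [if_neg h3]
          by_cases h4 : text ∈ ["*", "&", "->", "nullptr", "NULL"]
          · rw [if_pos h4, ih]
            simp only [List.mem_cons, List.not_mem_nil, or_false] at h1 h2 h3 h4 ⊢
            simp [h1, h2, h3, h4]
          · rw [if_neg h4, ih]
            simp only [List.mem_cons, List.not_mem_nil, or_false] at h1 h2 h3 h4 ⊢
            simp [h1, h2, h3, h4]

-- the chained (elif) conditions filter the same elements as B's plain ones: the sets are disjoint
theorem pv_tu_filter (l : List (Int × (String × String × Int))) :
    l.filterMap (fun x => if x.2.2.1 ∉ ["new", "delete", "malloc", "free", "alloc"] ∧ (x.2.2.1 ∈ ["template", "typename", "class"] ∧ x.2.1 = "KEYWORD") then some (x.1, x.2.2.1) else none)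
      = l.filterMap (fun x => if x.2.2.1 ∈ ["template", "typename", "class"] ∧ x.2.1 = "KEYWORD" then some (x.1, x.2.2.1) else none) := by
  refine congrFun (congrArg List.filterMap (funext fun x => ?_)) l
  by_cases h : x.2.2.1 ∈ ["template", "typename", "class"] ∧ x.2.1 = "KEYWORD"
  · rw [if_pos h, if_pos ⟨pv_tu_not_mm _ h.1, h⟩]
  · rw [if_neg h, if_neg (fun hc => h hc.2)]

theorem pv_su_filter (l : List (Int × (String × String × Int))) :
    l.filterMap (fun x => if x.2.2.1 ∉ ["new", "delete", "malloc", "free", "alloc"] ∧ ¬(x.2.2.1 ∈ ["template", "typename", "class"] ∧ x.2.1 = "KEYWORD") ∧ x.2.2.1 ∈ ["vector", "map", "set", "list", "queue", "stack", "array", "deque"] then some (x.1, x.2.2.1) else none)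
      = l.filterMap (fun x => if x.2.2.1 ∈ ["vector", "map", "set", "list", "queue", "stack", "array", "deque"] then some (x.1, x.2.2.1) else none) := by
  refine congrFun (congrArg List.filterMap (funext fun x => ?_)) l
  by_cases h : x.2.2.1 ∈ ["vector", "map", "set", "list", "queue", "stack", "array", "deque"]
  · rw [if_pos h, if_pos ⟨pv_su_not_mm _ h, fun hc => pv_su_not_tu _ h hc.1, h⟩]
  · rw [if_neg h, if_neg (fun hc => h hc.2.2)]

theorem pv_pu_filter (l : List (Int × (String × String × Int))) :
    l.filterMap (fun x => if x.2.2.1 ∉ ["new", "delete", "malloc", "free", "alloc"] ∧ ¬(x.2.2.1 ∈ ["template", "typename", "class"] ∧ x.2.1 = "KEYWORD") ∧ x.2.2.1 ∉ ["vector", "map", "set", "list", "queue", "stack", "array", "deque"] ∧ x.2.2.1 ∈ ["*", "&", "->", "nullptr", "NULL"] then some (x.1, x.2.2.1) else none)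
      = l.filterMap (fun x => if x.2.2.1 ∈ ["*", "&", "->", "nullptr", "NULL"] then some (x.1, x.2.2.1) else none) := by
  refine congrFun (congrArg List.filterMap (funext fun x => ?_)) l
  by_cases h : x.2.2.1 ∈ ["*", "&", "->", "nullptr", "NULL"]
  · rw [if_pos h, if_pos ⟨pv_pu_not_mm _ h, fun hc => pv_pu_not_tu _ h hc.1, pv_pu_not_su _ h, h⟩]
  · rw [if_neg h, if_neg (fun hc => h hc.2.2.2)]

-- ===== VERDICT (by name: the statement is the Claim_ definition above) =====
theorem extract_cpp_patterns_spec : Claim_equal_extract_cpp_patterns := by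
  intro tokens _
  unfold Spec_extract_cpp_patterns extract_cpp_patterns extract_cpp_patterns_alt
    pvCompMM pvCompTU pvCompSU pvCompPU
  rw [pv_foldl_spec, pv_tu_filter, pv_su_filter, pv_pu_filter]
  simp
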